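-- pv_equiv track=rewrite | github.com/positivebullshit/PrakSem6 | Prak 6 sem/Task2/Functions.py | word_to_modules
-- ===== SOURCE A (Python) =====
-- def word_to_modules(word,alphabet):
--     modules=[]
--     module=''
--     for character in word:
--         if character in alphabet :
--             modules.append(module)
--             module=character
--         else:
--             if character not in ['[',']','{','}','°']:
--                 module=module + character
--     modules.append(module) #append last module
--     modules=modules[1:]
--     return modules
-- ===== SOURCE B (Python) =====
-- def word_to_modules(word, alphabet):
--     starts = [i for i, c in enumerate(word) if c in alphabet]
--     if not starts:
--         return []
--     bounds = starts[1:] + [len(word)]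
--     skip = {'[', ']', '{', '}', '\u00b0'}
--     return [word[s] + ''.join(c for c in word[s + 1:e] if c not in skip)
--             for s, e in zip(starts, bounds)]
-- ===== Notes on version B (the rewrite author's own statement) =====
-- stated objective: alternative
-- what changed: A's single incremental flush loop (accumulate a module, flush it on each boundary character, drop the dummy first entry) is replaced by first collecting the boundary indices and then building each module directly from the word slice between consecutive boundaries.
import Mathlib
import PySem

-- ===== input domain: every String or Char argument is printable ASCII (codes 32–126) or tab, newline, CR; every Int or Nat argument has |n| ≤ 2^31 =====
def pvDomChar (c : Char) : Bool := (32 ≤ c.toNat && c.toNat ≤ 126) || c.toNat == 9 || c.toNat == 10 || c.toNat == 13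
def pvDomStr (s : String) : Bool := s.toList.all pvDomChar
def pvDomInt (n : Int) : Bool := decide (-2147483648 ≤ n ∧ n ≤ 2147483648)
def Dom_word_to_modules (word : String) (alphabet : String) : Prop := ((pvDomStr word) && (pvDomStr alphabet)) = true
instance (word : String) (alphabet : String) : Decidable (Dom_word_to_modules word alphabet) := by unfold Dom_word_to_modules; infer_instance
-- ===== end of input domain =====

-- B replaces A's incremental flush loop by collecting the module start indices first and
-- slicing the word between consecutive boundaries (objective: alternative decomposition).

-- ===== PORT A =====
-- the literal list ['[',']','{','}','°'] of A's skip test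
def pvSkipList : List Char := ['[', ']', '{', '}', '°']

-- the for-loop of A as structural recursion over the same state (modules, module);
-- the accumulated Python string `module` is carried as its character list, exact on all inputs
def pvGoA (alpha : List Char) : List Char → List String → List Char → List String
  | [], ms, m => ms ++ [String.ofList m]                       -- modules.append(module) after the loop
  | c :: rest, ms, m =>
    if alpha.contains c then                               -- `character in alphabet` (single char ⇔ membership)
      pvGoA alpha rest (ms ++ [String.ofList m]) [c]
    else if pvSkipList.contains c then
      pvGoA alpha rest ms m
    else
      pvGoA alpha rest ms (m ++ [c])

def word_to_modules (word : String) (alphabet : String) : List String :=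
  (pvGoA alphabet.toList word.toList [] []).drop 1         -- modules = modules[1:]

-- ===== PORT B =====
-- indices of the characters of cs that lie in alpha (enumerate(word) ported by hand with
-- Nat counters; exact since Python's enumerate indices here are the nonnegative 0,1,2,…)
def pvStartsFrom (alpha : List Char) (i : Nat) : List Char → List Nat
  | [] => []
  | c :: rest =>
    if alpha.contains c then i :: pvStartsFrom alpha (i + 1) rest
    else pvStartsFrom alpha (i + 1) rest

-- word[s] + ''.join(c for c in word[s+1:e] if c not in skip); s is a start index (in range,
-- nonnegative) and s+1 ≤ e ≤ len cs, so the Python slice is drop/take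
def pvModuleAt (cs : List Char) (s e : Nat) : String :=
  match cs.drop s with
  | [] => ""                                               -- unreachable: s is a valid index
  | c :: _ => String.ofList (c :: ((cs.drop (s + 1)).take (e - (s + 1))).filter (fun d => !pvSkipList.contains d))

def word_to_modules_alt (word : String) (alphabet : String) : List String :=
  let cs := word.toList
  let starts := pvStartsFrom alphabet.toList 0 cs
  match starts with
  | [] => []
  | _ :: _ =>
    let bounds := starts.drop 1 ++ [cs.length]
    (starts.zip bounds).map (fun p => pvModuleAt cs p.1 p.2)

-- ===== PRECONDITION & SPEC =====
def Spec_word_to_modules (word : String) (alphabet : String) (out : List String) : Prop := out = word_to_modules_alt word alphabet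
instance (word : String) (alphabet : String) (out : List String) : Decidable (Spec_word_to_modules word alphabet out) := by unfold Spec_word_to_modules; infer_instance

-- ===== CLAIM (what is proved, stated in full; the proofs are below) =====
def Claim_equal_word_to_modules : Prop := ∀ (word : String) (alphabet : String), Dom_word_to_modules word alphabet → Spec_word_to_modules word alphabet (word_to_modules word alphabet)

-- ===== LEMMAS AND PROOFS =====

-- intermediate characterisation: (filtered chars before the first boundary, modules)
def pvAux (alpha : List Char) : List Char → List Char × List String
  | [] => ([], [])
  | c :: rest =>
    let pm := pvAux alpha rest
    if alpha.contains c then ([], String.ofList (c :: pm.1) :: pm.2)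
    else if pvSkipList.contains c then pm
    else (c :: pm.1, pm.2)

lemma pvGoA_eq (alpha : List Char) (cs : List Char) : ∀ (ms : List String) (m : List Char),
    pvGoA alpha cs ms m = ms ++ [String.ofList (m ++ (pvAux alpha cs).1)] ++ (pvAux alpha cs).2 := by
  induction cs with
  | nil => intro ms m; simp [pvGoA, pvAux]
  | cons c rest ih =>
    intro ms m
    by_cases hb : c ∈ alpha
    · simp [pvGoA, pvAux, hb, ih]
    · by_cases hs : c ∈ pvSkipList
      · simp [pvGoA, pvAux, hb, hs, ih]
      · simp [pvGoA, pvAux, hb, hs, ih]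

-- the position of the first boundary character (cs.length if none)
def pvFirstB (alpha : List Char) (cs : List Char) : Nat :=
  match pvStartsFrom alpha 0 cs with
  | [] => cs.length
  | i :: _ => i

lemma pvStartsFrom_shift (alpha : List Char) (cs : List Char) : ∀ (i : Nat),
    pvStartsFrom alpha i cs = (pvStartsFrom alpha 0 cs).map (· + i) := by
  induction cs with
  | nil => intro i; simp [pvStartsFrom]
  | cons c rest ih =>
    intro i
    by_cases hb : c ∈ alpha
    · simp [pvStartsFrom, hb, ih 1, ih (i + 1), List.map_map]
      intros; omega
    · simp [pvStartsFrom, hb, ih 1, ih (i + 1), List.map_map]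
      intros; omega

lemma pvAux_fst (alpha : List Char) (cs : List Char) :
    (pvAux alpha cs).1 = (cs.take (pvFirstB alpha cs)).filter (fun d => !pvSkipList.contains d) := by
  induction cs with
  | nil => simp [pvAux, pvFirstB, pvStartsFrom]
  | cons c rest ih =>
    by_cases hb : c ∈ alpha
    · simp [pvAux, pvFirstB, pvStartsFrom, hb]
    · have hfb : pvFirstB alpha (c :: rest) = pvFirstB alpha rest + 1 := by
        simp only [pvFirstB, pvStartsFrom, pvStartsFrom_shift alpha rest 1]
        cases pvStartsFrom alpha 0 rest <;> simp [hb]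
      by_cases hs : c ∈ pvSkipList
      · simp [pvAux, hb, hs, hfb, ih]
      · simp [pvAux, hb, hs, hfb, ih]

lemma pvModuleAt_shift (c : Char) (cs : List Char) (s e : Nat) :
    pvModuleAt (c :: cs) (s + 1) (e + 1) = pvModuleAt cs s e := by
  simp only [pvModuleAt, List.drop_succ_cons]
  have : e + 1 - (s + 1 + 1) = e - (s + 1) := by omega
  rw [this]

lemma pvAux_snd_nil (alpha : List Char) (cs : List Char)
    (h : pvStartsFrom alpha 0 cs = []) : (pvAux alpha cs).2 = [] := by
  induction cs with
  | nil => simp [pvAux]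
  | cons c rest ih =>
    by_cases hb : c ∈ alpha
    · simp [pvStartsFrom, hb] at h
    · simp [pvStartsFrom, hb, pvStartsFrom_shift alpha rest 1] at h
      have h0 : pvStartsFrom alpha 0 rest = [] := h
      by_cases hs : c ∈ pvSkipList <;> simp [pvAux, hb, hs, ih h0]

-- the core of B (modules from an explicit start list), to run the induction on
def pvModsFrom (cs : List Char) (starts : List Nat) : List String :=
  match starts with
  | [] => []
  | _ :: _ => (starts.zip (starts.drop 1 ++ [cs.length])).map (fun p => pvModuleAt cs p.1 p.2)

lemma pvZip_map_shift (c : Char) (cs : List Char) (st bd : List Nat) :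
    ((st.map (· + 1)).zip (bd.map (· + 1))).map (fun p => pvModuleAt (c :: cs) p.1 p.2)
      = (st.zip bd).map (fun p => pvModuleAt cs p.1 p.2) := by
  rw [List.zip_map]
  rw [List.map_map]
  exact List.map_congr_left (fun p _ => pvModuleAt_shift c cs p.1 p.2)

lemma pvModsFrom_eq (alpha : List Char) (cs : List Char) :
    pvModsFrom cs (pvStartsFrom alpha 0 cs) = (pvAux alpha cs).2 := by
  induction cs with
  | nil => simp [pvModsFrom, pvStartsFrom, pvAux]
  | cons c rest ih =>
    by_cases hb : c ∈ alpha
    · -- boundary: starts = 0 :: shifted starts of rest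
      have hst : pvStartsFrom alpha 0 (c :: rest) = 0 :: (pvStartsFrom alpha 0 rest).map (· + 1) := by
        simp [pvStartsFrom, hb, pvStartsFrom_shift alpha rest 1]
      cases hx : pvStartsFrom alpha 0 rest with
      | nil =>
        -- single module: c followed by all kept chars of rest
        have hp := pvAux_fst alpha rest
        have h2 := pvAux_snd_nil alpha rest hx
        simp only [pvFirstB, hx] at hp
        simp [pvModsFrom, hst, hx, pvAux, hb, pvModuleAt, h2, hp]
      | cons i tl =>
        have hp := pvAux_fst alpha rest
        simp only [pvFirstB, hx] at hp
        have hi : pvModuleAt (c :: rest) 0 (i + 1)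
            = String.ofList (c :: (pvAux alpha rest).1) := by
          simp [pvModuleAt, hp]
        rw [hx] at ih
        simp only [pvModsFrom, List.drop_succ_cons, List.drop_zero] at ih
        rw [hst, hx]
        rw [show (List.map (fun x => x + 1) (i :: tl)) = ((i + 1) :: tl.map (· + 1)) from by simp]
        simp only [pvModsFrom, List.drop_succ_cons, List.drop_zero, List.map_cons,
          List.length_cons, List.cons_append, List.zip_cons_cons]
        rw [show ((i + 1) :: tl.map (· + 1)) = ((i :: tl).map (· + 1)) by simp,
          show (tl.map (· + 1) ++ [rest.length + 1]) = ((tl ++ [rest.length]).map (· + 1)) by simp]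
        rw [pvZip_map_shift, hi, ih]
        simp [pvAux, hb]
    · have hst : pvStartsFrom alpha 0 (c :: rest) = (pvStartsFrom alpha 0 rest).map (· + 1) := by
        simp [pvStartsFrom, hb, pvStartsFrom_shift alpha rest 1]
      have haux : (pvAux alpha (c :: rest)).2 = (pvAux alpha rest).2 := by
        by_cases hs : c ∈ pvSkipList <;> simp [pvAux, hb, hs]
      cases hx : pvStartsFrom alpha 0 rest with
      | nil => simp [pvModsFrom, hst, hx, haux, pvAux_snd_nil alpha rest hx]
      | cons i tl =>
        rw [hx] at ih
        simp only [pvModsFrom, List.drop_succ_cons, List.drop_zero] at ih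
        rw [hst, hx]
        simp only [pvModsFrom, List.drop_succ_cons, List.drop_zero, List.map_cons,
          List.length_cons]
        rw [show (tl.map (· + 1) ++ [rest.length + 1]) = ((tl ++ [rest.length]).map (· + 1)) by simp,
          show ((i + 1) :: tl.map (· + 1)) = ((i :: tl).map (· + 1)) by simp, pvZip_map_shift]
        rw [ih, haux]

-- ===== VERDICT (by name: the statement is the Claim_ definition above) =====
theorem word_to_modules_spec : Claim_equal_word_to_modules := by
  intro word alphabet _
  unfold Spec_word_to_modules word_to_modules word_to_modules_alt
  rw [pvGoA_eq]
  rw [← pvModsFrom_eq alphabet.toList word.toList]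
  simp only [List.nil_append]
  unfold pvModsFrom
  cases hx : pvStartsFrom alphabet.toList 0 word.toList with
  | nil => simp
  | cons i tl => simp
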